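-- pv_equiv track=rewrite | github.com/DragonistYJ/Algorithm | Python/Solution890.py | create_pattern
-- ===== SOURCE A (Python) =====
-- from typing import List
--
-- def create_pattern(word: str) -> List[int]:
--     position_map = {}
--     index = 0
--     pattern_list = []
--
--     for c in word:
--         if c in position_map:
--             pattern_list.append(position_map[c])
--         else:
--             pattern_list.append(index)
--             position_map[c] = index
--             index += 1
--     return pattern_list
-- ===== SOURCE B (Python) =====
-- def create_pattern(word):
--     # rank of a character = number of distinct characters that appear
--     # strictly before its first occurrence in the word
--     rank = {c: len(set(word[:word.index(c)])) for c in set(word)}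
--     return [rank[c] for c in word]
-- ===== Notes on version B (the rewrite author's own statement) =====
-- stated objective: alternative
-- what changed: Drops A's online pass (counter + membership branch populating a growing position map): each distinct character's rank is computed independently as the cardinality of the set of characters in the prefix before its first occurrence (len(set(word[:word.index(c)]))), memoized once per distinct character, then emitted per position.
import Mathlib
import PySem

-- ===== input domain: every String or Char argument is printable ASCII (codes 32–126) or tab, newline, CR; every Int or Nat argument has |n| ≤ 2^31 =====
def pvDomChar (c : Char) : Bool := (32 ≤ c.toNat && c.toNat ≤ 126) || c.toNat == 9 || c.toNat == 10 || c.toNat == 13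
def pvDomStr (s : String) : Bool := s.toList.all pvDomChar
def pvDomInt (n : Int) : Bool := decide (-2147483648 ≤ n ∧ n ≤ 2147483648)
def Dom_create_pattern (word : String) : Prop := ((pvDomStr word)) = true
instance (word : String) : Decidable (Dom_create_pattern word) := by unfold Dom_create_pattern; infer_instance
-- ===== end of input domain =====

-- B drops A's position map and counter: each entry is computed independently as the number of
-- distinct characters in the prefix before the first occurrence of that character.

-- ===== PORT A =====
-- loop body of A's single pass: state = (position_map, index, pattern_list)
def cpStep (st : PySem.Dict Char Int × Int × List Int) (c : Char) :
    PySem.Dict Char Int × Int × List Int :=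
  let (pm, idx, pl) := st
  match pm.get? c with
  | some v => (pm, idx, pl ++ [v])
  | none   => (pm.insert c idx, idx + 1, pl ++ [idx])

def create_pattern (word : String) : List Int :=
  (word.toList.foldl cpStep (PySem.Dict.empty, 0, [])).2.2

-- ===== PORT B =====
-- rank = {c: len(set(word[:word.index(c)])) for c in set(word)}; [rank[c] for c in word]
-- word.index(c) never raises here (c is drawn from word) so .getD 0 is never the default,
-- and rank[c] never raises KeyError (c ∈ set(word)) so .getD 0 is never the default either;
-- the dict is built by iterating the set and only looked up afterwards (order-independent)
def cpRankOf (word : String) (c : Char) : Int :=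
  (((PySem.Set.ofList
      (PySem.List.slice word.toList none
        (some (((PySem.List.index? word.toList c).getD 0 : Nat) : Int)))).length : Nat) : Int)

def create_pattern_alt (word : String) : List Int :=
  let rank : PySem.Dict Char Int :=
    (PySem.Set.ofList word.toList).foldl
      (fun d c => d.insert c (cpRankOf word c)) PySem.Dict.empty
  word.toList.map (fun c => (rank.get? c).getD 0)

-- ===== PRECONDITION & SPEC =====
def Spec_create_pattern (word : String) (out : List Int) : Prop := out = create_pattern_alt word
instance (word : String) (out : List Int) : Decidable (Spec_create_pattern word out) := by unfold Spec_create_pattern; infer_instance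

-- ===== CLAIM (what is proved, stated in full; the proofs are below) =====
def Claim_equal_create_pattern : Prop := ∀ (word : String), Dom_create_pattern word → Spec_create_pattern word (create_pattern word)

-- ===== LEMMAS AND PROOFS =====

theorem getD_idxOf? (c : Char) (s : List Char) (h : c ∈ s) :
    (List.idxOf? c s).getD 0 = List.idxOf c s := by
  induction s with
  | nil => simp at h
  | cons x t ih =>
    by_cases hx : x = c
    · subst hx; simp [List.idxOf?_cons]
    · simp only [List.mem_cons] at h
      rcases h with h|h
      · exact absurd h.symm hx
      · have := ih h
        cases ho : List.idxOf? c t with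
        | none => simp [List.idxOf?_eq_none_iff] at ho; exact absurd h ho
        | some k => simp [ho, List.idxOf?_cons, hx] at this ⊢; omega

-- dedup of p ++ [c]
theorem dedup_append_mem (p : List Char) (c : Char) (h : c ∈ p) :
    PySem.List.dedup (p ++ [c]) = PySem.List.dedup p := by
  simp only [PySem.List.dedup_eq_ofList, PySem.Set.ofList_append_singleton]
  exact PySem.Set.add_of_mem (by simpa [PySem.Set.mem_ofList] using h)

theorem dedup_append_not_mem (p : List Char) (c : Char) (h : c ∉ p) :
    PySem.List.dedup (p ++ [c]) = PySem.List.dedup p ++ [c] := by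
  simp only [PySem.List.dedup_eq_ofList, PySem.Set.ofList_append_singleton]
  exact PySem.Set.add_of_not_mem (by simpa [PySem.Set.mem_ofList] using h)

-- the first-occurrence index of a char already in p is stable under extending the list
theorem idxOf_dedup_stable (s p : List Char) (c : Char) (h : c ∈ p) :
    (PySem.List.dedup (p ++ s)).idxOf c = (PySem.List.dedup p).idxOf c := by
  induction s generalizing p with
  | nil => simp
  | cons x t ih =>
    have hassoc : p ++ x :: t = (p ++ [x]) ++ t := by simp
    rw [hassoc, ih (p ++ [x]) (List.mem_append_left _ h)]
    by_cases hx : x ∈ p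
    · rw [dedup_append_mem p x hx]
    · rw [dedup_append_not_mem p x hx,
        List.idxOf_append_of_mem (by simpa [PySem.List.mem_dedup] using h)]

-- rank of c in the dedup of p ++ c :: t, for a fresh c, is the number of distinct chars of p
theorem idxOf_dedup_head (p t : List Char) (c : Char) (h : c ∉ p) :
    (PySem.List.dedup (p ++ c :: t)).idxOf c = (PySem.List.dedup p).length := by
  have hassoc : p ++ c :: t = (p ++ [c]) ++ t := by simp
  rw [hassoc, idxOf_dedup_stable t (p ++ [c]) c (by simp),
    dedup_append_not_mem p c h]
  simp only [List.idxOf_append, PySem.List.mem_dedup]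
  rw [if_neg h]; simp

-- split a list at the first occurrence of c
theorem exists_split_idxOf (l : List Char) (c : Char) (h : c ∈ l) :
    ∃ p t, l = p ++ c :: t ∧ c ∉ p ∧ l.idxOf c = p.length := by
  induction l with
  | nil => simp at h
  | cons x t ih =>
    by_cases hx : x = c
    · subst hx; exact ⟨[], t, by simp⟩
    · simp only [List.mem_cons] at h
      rcases h with h|h
      · exact absurd h.symm hx
      · obtain ⟨p, t', hl, hc, hi⟩ := ih h
        exact ⟨x :: p, t', by simp [hl], by simp only [List.mem_cons, not_or]; exact ⟨fun e => hx e.symm, hc⟩,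
          by simp [List.idxOf_cons_ne _ hx, hi]⟩

-- invariant of A's loop: pm maps exactly the chars of the processed prefix p to their
-- first-occurrence index, and the output so far extends by the dedup-indices of the rest
theorem cp_loop (s : List Char) : ∀ (p : List Char) (pm : PySem.Dict Char Int) (out : List Int),
    (∀ c, pm.get? c = if c ∈ p then some (((PySem.List.dedup p).idxOf c : Nat) : Int) else none) →
    (s.foldl cpStep (pm, (((PySem.List.dedup p).length : Nat) : Int), out)).2.2 =
      out ++ s.map (fun c => (((PySem.List.dedup (p ++ s)).idxOf c : Nat) : Int)) := by
  induction s with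
  | nil => intro p pm out _; simp
  | cons c t ih =>
    intro p pm out hpm
    have hassoc : p ++ c :: t = (p ++ [c]) ++ t := by simp
    by_cases hc : c ∈ p
    · have hstep : cpStep (pm, (((PySem.List.dedup p).length : Nat) : Int), out) c =
          (pm, (((PySem.List.dedup p).length : Nat) : Int),
            out ++ [(((PySem.List.dedup p).idxOf c : Nat) : Int)]) := by
        simp [cpStep, hpm c, hc]
      have hd : PySem.List.dedup (p ++ [c]) = PySem.List.dedup p := dedup_append_mem p c hc
      have hpm' : ∀ c', pm.get? c' =
          if c' ∈ p ++ [c] then some (((PySem.List.dedup (p ++ [c])).idxOf c' : Nat) : Int)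
          else none := by
        intro c'
        rw [hd, hpm c']
        by_cases h' : c' ∈ p
        · simp [h', List.mem_append_left _ h']
        · by_cases he : c' = c
          · subst he; exact absurd hc h'
          · simp [h', he]
      have hih := ih (p ++ [c]) pm (out ++ [(((PySem.List.dedup p).idxOf c : Nat) : Int)]) hpm'
      rw [hd] at hih
      rw [List.foldl_cons, hstep, hassoc, hih]
      have hhead : (PySem.List.dedup (p ++ c :: t)).idxOf c = (PySem.List.dedup p).idxOf c := by
        rw [hassoc, idxOf_dedup_stable t (p ++ [c]) c (by simp), hd]
      simp only [List.map_cons, hhead, List.append_assoc, List.cons_append, List.nil_append]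
    · have hstep : cpStep (pm, (((PySem.List.dedup p).length : Nat) : Int), out) c =
          (pm.insert c (((PySem.List.dedup p).length : Nat) : Int),
            (((PySem.List.dedup p).length : Nat) : Int) + 1,
            out ++ [(((PySem.List.dedup p).length : Nat) : Int)]) := by
        simp [cpStep, hpm c, hc]
      have hd : PySem.List.dedup (p ++ [c]) = PySem.List.dedup p ++ [c] :=
        dedup_append_not_mem p c hc
      have hlen : (((PySem.List.dedup p).length : Nat) : Int) + 1 =
          (((PySem.List.dedup (p ++ [c])).length : Nat) : Int) := by
        rw [hd]; simp
      have hidxc : (PySem.List.dedup (p ++ [c])).idxOf c = (PySem.List.dedup p).length := by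
        rw [hd]; simp only [List.idxOf_append, PySem.List.mem_dedup]
        rw [if_neg hc]; simp
      have hpm' : ∀ c', (pm.insert c (((PySem.List.dedup p).length : Nat) : Int)).get? c' =
          if c' ∈ p ++ [c] then some (((PySem.List.dedup (p ++ [c])).idxOf c' : Nat) : Int)
          else none := by
        intro c'
        rw [PySem.Dict.get?_insert]
        by_cases he : c' = c
        · subst he; rw [hidxc]; simp
        · rw [if_neg he, hpm c']
          by_cases h' : c' ∈ p
          · have hmm : c' ∈ p ++ [c] := List.mem_append_left _ h'
            rw [if_pos h', if_pos hmm, hd,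
              List.idxOf_append_of_mem (by simpa [PySem.List.mem_dedup] using h')]
          · have hna : c' ∉ p ++ [c] := by simp [h', he]
            simp [h', hna]
      have hih := ih (p ++ [c]) _ (out ++ [(((PySem.List.dedup p).length : Nat) : Int)]) hpm'
      rw [List.foldl_cons, hstep, hlen, hassoc, hih]
      have hhead : (PySem.List.dedup (p ++ c :: t)).idxOf c = (PySem.List.dedup p).length := by
        rw [hassoc, idxOf_dedup_stable t (p ++ [c]) c (by simp), hidxc]
      simp only [List.map_cons, hhead, List.append_assoc, List.cons_append, List.nil_append]

theorem create_pattern_eq (word : String) :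
    create_pattern word =
      word.toList.map (fun c => (((PySem.List.dedup word.toList).idxOf c : Nat) : Int)) := by
  unfold create_pattern
  have h0 : ∀ c : Char, (PySem.Dict.empty : PySem.Dict Char Int).get? c =
      if c ∈ ([] : List Char) then some (((PySem.List.dedup ([] : List Char)).idxOf c : Nat) : Int)
      else none := by
    intro c; simp [PySem.Dict.get?_empty]
  have := cp_loop word.toList [] PySem.Dict.empty [] h0
  simpa using this

-- B's entry: distinct chars in the prefix before c's first occurrence = c's rank in dedup
theorem alt_entry (l : List Char) (c : Char) (h : c ∈ l) :
    (PySem.Set.ofList (l.take (l.idxOf c))).length = (PySem.List.dedup l).idxOf c := by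
  obtain ⟨p, t, hl, hc, hi⟩ := exists_split_idxOf l c h
  subst hl
  rw [hi, List.take_left, ← PySem.List.dedup_eq_ofList, idxOf_dedup_head p t c hc]

-- lookup in the dict built by folding insert over a list of keys
theorem get?_foldl_insert (f : Char → Int) (x : Char) : ∀ (s : List Char) (d : PySem.Dict Char Int),
    (s.foldl (fun d c => d.insert c (f c)) d).get? x =
      if x ∈ s then some (f x) else d.get? x := by
  intro s
  induction s with
  | nil => intro d; simp
  | cons c t ih =>
    intro d
    rw [List.foldl_cons, ih]
    by_cases ht : x ∈ t
    · simp [ht]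
    · rw [if_neg ht, PySem.Dict.get?_insert]
      by_cases he : x = c
      · subst he; simp
      · simp [he, ht]

theorem create_pattern_alt_eq (word : String) :
    create_pattern_alt word =
      word.toList.map (fun c => (((PySem.List.dedup word.toList).idxOf c : Nat) : Int)) := by
  unfold create_pattern_alt
  apply List.map_congr_left
  intro c hc
  rw [get?_foldl_insert (cpRankOf word) c _ PySem.Dict.empty,
    if_pos (by rwa [PySem.Set.mem_ofList]), Option.getD_some]
  unfold cpRankOf
  rw [PySem.List.index?_eq_idxOf?, getD_idxOf? c _ hc,
    PySem.List.slice_to_natCast, alt_entry word.toList c hc]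

-- ===== VERDICT (by name: the statement is the Claim_ definition above) =====
theorem create_pattern_spec : Claim_equal_create_pattern := by
  intro word _
  unfold Spec_create_pattern
  rw [create_pattern_eq, create_pattern_alt_eq]
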